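-- pv_equiv track=rewrite | github.com/computerman2027/python-lab-day-10 | p5.py | reverse_sentence_and_count_vowels
-- ===== SOURCE A (Python) =====
-- def reverse_sentence_and_count_vowels(sentence):
--     sentence=sentence+" "
--     ans=""
--     w=""
--     noofvowel=0
--     for ch in sentence:
--         if ch in "aeiouAEIOU":
--             noofvowel+=1
--         if ch==' ':
--             ans=w+" "+ans
--             w=""
--         else:
--             w=w+ch
--     return ans.strip(),noofvowel
-- ===== SOURCE B (Python) =====
-- def reverse_sentence_and_count_vowels(sentence):
--     words = sentence.split(' ')
--     reversed_sentence = ' '.join(reversed(words)).strip()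
--     vowels = sum(ch in "aeiouAEIOU" for ch in sentence)
--     return reversed_sentence, vowels
-- ===== Notes on version B (the rewrite author's own statement) =====
-- stated objective: idiomatic
-- what changed: Replaces A's single fused character loop (word/result accumulators plus a running vowel counter) with three staged library passes: split on single spaces, reverse-and-join with strip, and an independent vowel-counting sum.
import Mathlib
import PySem

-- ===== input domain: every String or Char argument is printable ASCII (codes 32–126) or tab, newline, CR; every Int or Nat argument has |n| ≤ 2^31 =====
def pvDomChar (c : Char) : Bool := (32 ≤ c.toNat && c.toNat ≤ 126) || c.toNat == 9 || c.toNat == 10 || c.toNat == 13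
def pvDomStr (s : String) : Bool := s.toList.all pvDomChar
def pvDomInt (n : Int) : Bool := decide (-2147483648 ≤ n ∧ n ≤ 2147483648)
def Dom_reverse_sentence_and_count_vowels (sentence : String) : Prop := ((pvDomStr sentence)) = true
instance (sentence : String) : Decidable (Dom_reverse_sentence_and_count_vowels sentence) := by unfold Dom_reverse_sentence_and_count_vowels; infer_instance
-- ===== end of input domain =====

-- B replaces A's single fused character loop with staged library passes (split(' ') → reverse → join → strip, plus an independent vowel count); return value proved equal.

-- ===== PORT A =====
-- A: one pass over sentence+" ", maintaining (ans, w, noofvowel).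
def reverse_sentence_and_count_vowels (sentence : String) : String × Int :=
  let cs := sentence.toList ++ [' ']                                       -- sentence = sentence + " "
  let st := cs.foldl (fun (st : List Char × List Char × Int) ch =>
      let ans := st.1
      let w := st.2.1
      let n := st.2.2
      let n := if ("aeiouAEIOU".toList.contains ch) then n + 1 else n      -- if ch in "aeiouAEIOU": noofvowel += 1
      if ch = ' ' then (w ++ ' ' :: ans, [], n)                            -- ans = w + " " + ans; w = ""
      else (ans, w ++ [ch], n))                                            -- w = w + ch
    ([], [], 0)
  (String.mk (PySem.Chars.strip st.1), st.2.2)                             -- return ans.strip(), noofvowel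

-- ===== PORT B =====
def reverse_sentence_and_count_vowels_alt (sentence : String) : String × Int :=
  let words := PySem.Chars.splitOn sentence.toList [' ']                   -- words = sentence.split(' ')
  let reversed_sentence :=
    PySem.Chars.strip (PySem.Chars.join [' '] words.reverse)               -- ' '.join(reversed(words)).strip()
  let vowels : Int :=
    (sentence.toList.countP (fun ch => "aeiouAEIOU".toList.contains ch) : Int)  -- sum(ch in "aeiouAEIOU" for ch in sentence)
  (String.mk reversed_sentence, vowels)

-- ===== PRECONDITION & SPEC =====
def Spec_reverse_sentence_and_count_vowels (sentence : String) (out : String × Int) : Prop := out = reverse_sentence_and_count_vowels_alt sentence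
instance (sentence : String) (out : String × Int) : Decidable (Spec_reverse_sentence_and_count_vowels sentence out) := by unfold Spec_reverse_sentence_and_count_vowels; infer_instance

-- ===== CLAIM =====
def Claim_equal_reverse_sentence_and_count_vowels : Prop := ∀ (sentence : String), Dom_reverse_sentence_and_count_vowels sentence → Spec_reverse_sentence_and_count_vowels sentence (reverse_sentence_and_count_vowels sentence)

-- ===== LEMMAS AND PROOFS =====

-- structural reference splitter: sp cur l = the tokens of l split on ' ', with cur prefixed to the first token
def sp (cur : List Char) : List Char → List (List Char)
  | [] => [cur]
  | c :: rest => if c = ' ' then cur :: sp [] rest else sp (cur ++ [c]) rest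

theorem sp_ne_nil (cur : List Char) (l : List Char) : sp cur l ≠ [] := by
  induction l generalizing cur with
  | nil => simp [sp]
  | cons c rest ih => by_cases h : c = ' ' <;> simp [sp, h] <;> exact ih _

theorem splitOn_go_eq_sp (fuel : Nat) (l cur : List Char) (acc : List (List Char))
    (hf : l.length ≤ fuel) :
    PySem.Chars.splitOn.go [' '] fuel l cur acc = acc.reverse ++ sp cur.reverse l := by
  induction fuel generalizing l cur acc with
  | zero =>
    have : l = [] := by simpa using hf
    subst this
    simp [PySem.Chars.splitOn.go, sp]
  | succ f ih =>
    cases l with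
    | nil => simp [PySem.Chars.splitOn.go, sp]
    | cons c rest =>
      by_cases h : c = ' '
      · subst h
        rw [show PySem.Chars.splitOn.go [' '] (f+1) (' '::rest) cur acc
            = PySem.Chars.splitOn.go [' '] f rest [] (cur.reverse :: acc) by
          simp [PySem.Chars.splitOn.go, List.isPrefixOf]]
        rw [ih rest [] (cur.reverse :: acc) (by simpa using Nat.le_of_succ_le_succ hf)]
        simp [sp]
      · rw [show PySem.Chars.splitOn.go [' '] (f+1) (c::rest) cur acc
            = PySem.Chars.splitOn.go [' '] f rest (c :: cur) acc by
          simp only [PySem.Chars.splitOn.go, List.isPrefixOf]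
          rw [if_neg]
          simp [Ne.symm h]]
        rw [ih rest (c :: cur) acc (by simpa using Nat.le_of_succ_le_succ hf)]
        simp [sp, h]

theorem splitOn_eq_sp (s : List Char) : PySem.Chars.splitOn s [' '] = sp [] s := by
  rw [PySem.Chars.splitOn, splitOn_go_eq_sp _ _ _ _ (by omega)]
  simp

def vow (ch : Char) : Bool := "aeiouAEIOU".toList.contains ch

def stepA (st : List Char × List Char × Int) (ch : Char) : List Char × List Char × Int :=
  let ans := st.1
  let w := st.2.1
  let n := st.2.2
  let n := if ("aeiouAEIOU".toList.contains ch) then n + 1 else n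
  if ch = ' ' then (w ++ ' ' :: ans, [], n) else (ans, w ++ [ch], n)

-- the reversed-words accumulator A builds: each token followed by a space, in reverse order
def rev1 (toks : List (List Char)) (ans : List Char) : List Char :=
  toks.foldl (fun a t => t ++ ' ' :: a) ans

theorem foldA_eq (l : List Char) : ∀ (ans w : List Char) (n : Int),
    l.foldl stepA (ans, w, n) =
      (rev1 (sp w l).dropLast ans, (sp w l).getLast!, n + (l.countP vow : Int)) := by
  induction l with
  | nil => intro ans w n; simp [sp, rev1]
  | cons c rest ih =>
    intro ans w n
    by_cases h : c = ' '
    · subst h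
      have hv : vow ' ' = false := by decide
      simp only [List.foldl_cons, stepA]
      rw [ih]
      have hne := sp_ne_nil ([] : List Char) rest
      have h1 : sp w (' ' :: rest) = w :: sp [] rest := by simp [sp]
      rw [h1]
      rw [List.dropLast_cons_of_ne_nil hne]
      have hg : (w :: sp [] rest).getLast! = (sp [] rest).getLast! := by
        cases hsp : sp [] rest with
        | nil => exact absurd hsp hne
        | cons a t => simp [List.getLast!]
      rw [hg]
      simp [rev1, hv, vow, List.countP_cons]
    · simp only [List.foldl_cons, stepA, if_neg h]
      rw [ih]
      have hsp : sp w (c :: rest) = sp (w ++ [c]) rest := by simp [sp, h]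
      by_cases hvc : ("aeiouAEIOU".toList.contains c) = true <;>
        simp [hsp, List.countP_cons, vow, hvc] <;> split_ifs <;> push_cast <;> ring

theorem sp_append_space (l : List Char) : ∀ cur, sp cur (l ++ [' ']) = sp cur l ++ [[]] := by
  induction l with
  | nil => intro cur; simp [sp]
  | cons c rest ih =>
    intro cur
    by_cases h : c = ' ' <;> simp [sp, h, ih]

theorem join_append_singleton (sep : List Char) (xs : List (List Char)) (t : List Char)
    (h : xs ≠ []) :
    PySem.Chars.join sep (xs ++ [t]) = PySem.Chars.join sep xs ++ sep ++ t := by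
  induction xs with
  | nil => exact absurd rfl h
  | cons a s ih =>
    cases s with
    | nil => simp [PySem.Chars.join, List.intercalate]
    | cons b s' =>
      have := ih (by simp)
      simp only [List.cons_append, PySem.Chars.join_cons_cons] at *
      rw [this]
      simp

theorem rev1_eq_join (toks : List (List Char)) (h : toks ≠ []) : ∀ ans,
    rev1 toks ans = PySem.Chars.join [' '] toks.reverse ++ ' ' :: ans := by
  induction toks with
  | nil => exact absurd rfl h
  | cons t ts ih =>
    intro ans
    cases ts with
    | nil => simp [rev1, PySem.Chars.join, List.intercalate]
    | cons b s' =>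
      simp only [rev1, List.foldl_cons] at *
      rw [ih (by simp) (t ++ ' ' :: ans)]
      rw [show (t :: b :: s').reverse = (b :: s').reverse ++ [t] by simp]
      rw [join_append_singleton _ _ _ (by simp)]
      simp

theorem strip_append_space (X : List Char) :
    PySem.Chars.strip (X ++ [' ']) = PySem.Chars.strip X := by
  unfold PySem.Chars.strip PySem.Chars.lstrip PySem.Chars.rstrip
  rw [List.dropWhile_append]
  by_cases h : (List.dropWhile PySem.Chars.isspace X).isEmpty
  · have hx : List.dropWhile PySem.Chars.isspace X = [] := List.isEmpty_iff.mp h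
    rw [if_pos h, hx]
    simp [List.dropWhile, show PySem.Chars.isspace ' ' = true from rfl]
  · rw [if_neg h]
    simp only [List.reverse_append, List.reverse_cons, List.reverse_nil, List.nil_append,
      List.singleton_append, List.dropWhile_cons]
    simp [show PySem.Chars.isspace ' ' = true from rfl]

-- ===== VERDICT =====
theorem reverse_sentence_and_count_vowels_spec : Claim_equal_reverse_sentence_and_count_vowels := by
  intro sentence _
  unfold Spec_reverse_sentence_and_count_vowels
  unfold reverse_sentence_and_count_vowels reverse_sentence_and_count_vowels_alt
  have hstep : (fun (st : List Char × List Char × Int) ch =>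
      let ans := st.1
      let w := st.2.1
      let n := st.2.2
      let n := if ("aeiouAEIOU".toList.contains ch) then n + 1 else n
      if ch = ' ' then (w ++ ' ' :: ans, [], n) else (ans, w ++ [ch], n)) = stepA := rfl
  simp only [hstep, foldA_eq, splitOn_eq_sp]
  set L := sentence.toList with hL
  have h1 : sp [] (L ++ [' ']) = sp [] L ++ [[]] := sp_append_space L []
  rw [h1, List.dropLast_concat]
  have h2 : (L ++ [' ']).countP vow = L.countP vow := by
    simp [List.countP_append, show vow ' ' = false from rfl]
  have h3 : rev1 (sp [] L) [] = PySem.Chars.join [' '] (sp [] L).reverse ++ [' '] := by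
    simpa using rev1_eq_join (sp [] L) (sp_ne_nil [] L) []
  have h4 : L.countP (fun ch => "aeiouAEIOU".toList.contains ch) = L.countP vow := rfl
  simp only [h2, h3, strip_append_space, h4]
  simp
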